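-- pv_equiv track=rewrite | github.com/MateusHSAraujo/MC102-2s2020 | labs/lab12.py | convolucao
-- ===== SOURCE A (Python) =====
-- def convolucao(imagem, M, D):
--     linha= len(imagem)
--     coluna= len(imagem[0])
--     imagemresultado=[ [0 for j in range(coluna-2)] for i in range(linha-2)]
--
--     for x in range(1,linha-1):
--         for y in range(1,coluna-1):
--             l1= (M[0][0]*imagem[x-1][y-1]) + (M[0][1]*imagem[x-1][y]) + (M[0][2]*imagem[x-1][y+1])
--             l2= (M[1][0]*imagem[x][y-1]) + (M[1][1]*imagem[x][y]) + (M[1][2]*imagem[x][y+1])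
--             l3= (M[2][0]*imagem[x+1][y-1]) + (M[2][1]*imagem[x+1][y]) + (M[2][2]*imagem[x+1][y+1])
--             novopixel= (l1+l2+l3)//D
--             if novopixel<0:
--                 novopixel = 0
--             if novopixel>255:
--                 novopixel=255
--             imagemresultado[x-1][y-1]= novopixel
--
--     return imagemresultado
-- ===== SOURCE B (Python) =====
-- def convolucao(imagem, M, D):
--     n = len(imagem) - 2
--     m = len(imagem[0]) - 2
--     acc = [[0] * m for _ in range(n)]
--     for ki in range(3):
--         for kj in range(3):
--             acc = [[v + M[ki][kj] * imagem[i + ki][j + kj]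
--                     for j, v in enumerate(row)]
--                    for i, row in enumerate(acc)]
--     return [[min(255, max(0, v // D)) for v in row] for row in acc]
-- ===== Notes on version B (the rewrite author's own statement) =====
-- stated objective: alternative
-- what changed: B inverts A's loop nesting: instead of gathering all nine kernel products per pixel in one sweep, it makes nine kernel-major accumulation passes over the whole output grid (one per kernel coefficient) and then a single final pass dividing by D and clamping to [0,255].
import Mathlib
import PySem

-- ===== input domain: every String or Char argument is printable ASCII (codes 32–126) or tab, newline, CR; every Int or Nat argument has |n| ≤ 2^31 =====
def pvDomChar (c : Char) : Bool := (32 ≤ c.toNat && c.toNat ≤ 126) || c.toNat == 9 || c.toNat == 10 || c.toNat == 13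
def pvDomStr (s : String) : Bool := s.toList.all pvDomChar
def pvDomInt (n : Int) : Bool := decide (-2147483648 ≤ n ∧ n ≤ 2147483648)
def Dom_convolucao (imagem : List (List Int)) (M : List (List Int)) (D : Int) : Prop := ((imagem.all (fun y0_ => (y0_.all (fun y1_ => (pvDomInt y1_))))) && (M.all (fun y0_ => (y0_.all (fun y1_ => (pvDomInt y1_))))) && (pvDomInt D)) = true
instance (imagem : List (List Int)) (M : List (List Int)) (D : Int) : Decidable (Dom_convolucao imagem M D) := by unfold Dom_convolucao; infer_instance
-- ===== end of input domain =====

-- B re-decomposes A's per-pixel gather as nine kernel-major accumulation passes plus one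
-- final normalize/clamp pass; same return value on Pre_ (no speed claim).

-- xs[i][j] for nonnegative in-range indices (all index reads of both ports are of this
-- shape; in range under Pre_convolucao, where it is exact Python indexing)
def pyCell (xs : List (List Int)) (i j : Int) : Int :=
  PySem.List.pyGetD (PySem.List.pyGetD xs i []) j 0

-- ===== PORT A =====
def convolucao (imagem : List (List Int)) (M : List (List Int)) (D : Int) : List (List Int) :=
  let linha : Int := imagem.length
  let coluna : Int := (PySem.List.pyGetD imagem 0 []).length  -- len(imagem[0]); imagem ≠ [] under Pre_
  let res0 : List (List Int) := List.replicate (linha - 2).toNat (List.replicate (coluna - 2).toNat 0)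
  (PySem.List.pyRange 1 (linha - 1) 1).foldl (fun res x =>
    (PySem.List.pyRange 1 (coluna - 1) 1).foldl (fun res y =>
      let l1 := pyCell M 0 0 * pyCell imagem (x-1) (y-1) + pyCell M 0 1 * pyCell imagem (x-1) y + pyCell M 0 2 * pyCell imagem (x-1) (y+1)
      let l2 := pyCell M 1 0 * pyCell imagem x (y-1) + pyCell M 1 1 * pyCell imagem x y + pyCell M 1 2 * pyCell imagem x (y+1)
      let l3 := pyCell M 2 0 * pyCell imagem (x+1) (y-1) + pyCell M 2 1 * pyCell imagem (x+1) y + pyCell M 2 2 * pyCell imagem (x+1) (y+1)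
      let novopixel := PySem.Int.floordiv (l1 + l2 + l3) D
      let novopixel := if novopixel < 0 then 0 else novopixel
      let novopixel := if novopixel > 255 then 255 else novopixel
      res.set (x-1).toNat ((res.getD (x-1).toNat []).set (y-1).toNat novopixel)) res) res0

-- ===== PORT B =====
-- one accumulation pass for kernel coefficient (ki,kj) (the i,j-indexed comprehension of Source B)
def convStep (imagem : List (List Int)) (M : List (List Int)) (ki kj : Int) (acc : List (List Int)) : List (List Int) :=
  acc.mapIdx (fun i row => row.mapIdx (fun j v =>
    v + pyCell M ki kj * pyCell imagem ((i : Int) + ki) ((j : Int) + kj)))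

def convolucao_alt (imagem : List (List Int)) (M : List (List Int)) (D : Int) : List (List Int) :=
  let n : Int := imagem.length - 2
  let m : Int := (PySem.List.pyGetD imagem 0 []).length - 2  -- len(imagem[0]); imagem ≠ [] under Pre_
  let acc0 : List (List Int) := List.replicate n.toNat (List.replicate m.toNat 0)
  let acc := (PySem.List.pyRange 0 3 1).foldl (fun a ki =>
    (PySem.List.pyRange 0 3 1).foldl (fun a kj => convStep imagem M ki kj a) a) acc0
  acc.map (fun row => row.map (fun v => min 255 (max 0 (PySem.Int.floordiv v D))))

-- ===== PRECONDITION & SPEC =====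
-- Pre_ = exactly where A returns: imagem nonempty (imagem[0] is always read), and when the
-- pixel loop actually runs (linha ≥ 3 and coluna ≥ 3): D ≠ 0 (ZeroDivisionError), every row
-- long enough for the column sweep, and a 3×3 top-left block present in M (IndexError).
def Pre_convolucao (imagem : List (List Int)) (M : List (List Int)) (D : Int) : Prop :=
  imagem ≠ [] ∧
  (3 ≤ imagem.length → 3 ≤ imagem.headI.length →
    D ≠ 0 ∧ (∀ r ∈ imagem, imagem.headI.length ≤ r.length) ∧
    3 ≤ M.length ∧ (∀ r ∈ M.take 3, 3 ≤ r.length))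
instance (imagem : List (List Int)) (M : List (List Int)) (D : Int) : Decidable (Pre_convolucao imagem M D) := by unfold Pre_convolucao; infer_instance

def pvWitness_convolucao : List (List Int) × List (List Int) × Int :=
  ([[1, 2, 3], [4, 5, 6], [7, 8, 9]], [[1, 0, 0], [0, 1, 0], [0, 0, 1]], 1)

def Spec_convolucao (imagem : List (List Int)) (M : List (List Int)) (D : Int) (out : List (List Int)) : Prop := out = convolucao_alt imagem M D
instance (imagem : List (List Int)) (M : List (List Int)) (D : Int) (out : List (List Int)) : Decidable (Spec_convolucao imagem M D out) := by unfold Spec_convolucao; infer_instance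

-- ===== CLAIM (what is proved, stated in full; the proofs are below) =====
def Claim_equal_convolucao : Prop := ∀ (imagem : List (List Int)) (M : List (List Int)) (D : Int), Dom_convolucao imagem M D → Pre_convolucao imagem M D → Spec_convolucao imagem M D (convolucao imagem M D)

-- ===== LEMMAS AND PROOFS =====

-- the value both programs put at output cell (k, j): the nine products accumulated in
-- B's kernel-major order, then divided and clamped
def pvAcc9 (imagem M : List (List Int)) (k j : Nat) : Int :=
  0 + pyCell M 0 0 * pyCell imagem ((k : Int) + 0) ((j : Int) + 0)
    + pyCell M 0 1 * pyCell imagem ((k : Int) + 0) ((j : Int) + 1)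
    + pyCell M 0 2 * pyCell imagem ((k : Int) + 0) ((j : Int) + 2)
    + pyCell M 1 0 * pyCell imagem ((k : Int) + 1) ((j : Int) + 0)
    + pyCell M 1 1 * pyCell imagem ((k : Int) + 1) ((j : Int) + 1)
    + pyCell M 1 2 * pyCell imagem ((k : Int) + 1) ((j : Int) + 2)
    + pyCell M 2 0 * pyCell imagem ((k : Int) + 2) ((j : Int) + 0)
    + pyCell M 2 1 * pyCell imagem ((k : Int) + 2) ((j : Int) + 1)
    + pyCell M 2 2 * pyCell imagem ((k : Int) + 2) ((j : Int) + 2)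

def pvVal (imagem M : List (List Int)) (D : Int) (k j : Nat) : Int :=
  min 255 (max 0 (PySem.Int.floordiv (pvAcc9 imagem M k j) D))

def pvTarget (imagem M : List (List Int)) (D : Int) : List (List Int) :=
  (List.range (((imagem.length : Int) - 2).toNat)).map (fun k =>
    (List.range ((((PySem.List.pyGetD imagem 0 []).length : Int) - 2).toNat)).map (fun j =>
      pvVal imagem M D k j))

-- generic: a left fold of index-writes with state-independent values, pointwise
theorem pv_foldl_set_getElem? {α : Type} (l : List Nat) (f : Nat → α) (r : List α) (j : Nat) :
    (l.foldl (fun r k => r.set k (f k)) r)[j]? =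
      if j ∈ l ∧ j < r.length then some (f j) else r[j]? := by
  induction l generalizing r with
  | nil => simp
  | cons k l ih =>
      simp only [List.foldl_cons]
      rw [ih]
      by_cases hk : j = k
      · subst hk
        by_cases hlt : j < r.length
        · by_cases hmem : j ∈ l <;> simp [hmem, hlt]
        · by_cases hmem : j ∈ l <;> simp [hmem, hlt]
      · by_cases hmem : j ∈ l <;> simp [hmem, hk, Ne.symm hk]

-- writing every index 0..m-1 of a length-m row yields the mapped row, whatever the row was
theorem pv_writeAll {α : Type} (f : Nat → α) (m : Nat) (r : List α) (hr : r.length = m) :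
    (List.range m).foldl (fun r k => r.set k (f k)) r = (List.range m).map f := by
  apply List.ext_getElem?
  intro j
  rw [pv_foldl_set_getElem?]
  by_cases hj : j < m
  · simp [hj, hr]
  · simp [hj, hr]

-- hoisting: a fold that only rewrites row k acts on that row alone
theorem pv_set_hoist {α β : Type} (l : List β) (k : Nat)
    (g : List α → β → List α) (res : List (List α)) (hk : k < res.length) :
    l.foldl (fun res y => res.set k (g (res.getD k []) y)) res
      = res.set k (l.foldl g (res.getD k [])) := by
  induction l generalizing res with
  | nil =>
      simp [List.getD_eq_getElem?_getD, List.getElem?_eq_getElem hk]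
  | cons y l ih =>
      simp only [List.foldl_cons]
      rw [ih _ (by simpa using hk)]
      rw [List.set_set]
      congr 1
      simp [List.getD_eq_getElem?_getD, List.getElem?_set_self hk, List.getElem?_eq_getElem hk]

-- the pixel value A computes at loop indices (x, y), verbatim from the port
def pvValA (imagem M : List (List Int)) (D : Int) (x y : Int) : Int :=
  let l1 := pyCell M 0 0 * pyCell imagem (x-1) (y-1) + pyCell M 0 1 * pyCell imagem (x-1) y + pyCell M 0 2 * pyCell imagem (x-1) (y+1)
  let l2 := pyCell M 1 0 * pyCell imagem x (y-1) + pyCell M 1 1 * pyCell imagem x y + pyCell M 1 2 * pyCell imagem x (y+1)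
  let l3 := pyCell M 2 0 * pyCell imagem (x+1) (y-1) + pyCell M 2 1 * pyCell imagem (x+1) y + pyCell M 2 2 * pyCell imagem (x+1) (y+1)
  let novopixel := PySem.Int.floordiv (l1 + l2 + l3) D
  let novopixel := if novopixel < 0 then 0 else novopixel
  if novopixel > 255 then 255 else novopixel

-- A's inner loop over a full row, with the hoist and write-all lemmas applied
theorem pv_stepA (val : Nat → Nat → Int) (m : Nat) (res : List (List Int)) (k : Nat)
    (hk : k < res.length) (hrow : (res.getD k []).length = m) :
    (List.range m).foldl (fun res j => res.set k ((res.getD k []).set j (val k j))) res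
      = res.set k ((List.range m).map (val k)) := by
  rw [pv_set_hoist (List.range m) k (fun r j => r.set j (val k j)) res hk,
      pv_writeAll (val k) m _ hrow]

-- A's outer loop, pointwise
theorem pv_foldA (val : Nat → Nat → Int) (m : Nat) (l : List Nat) :
    ∀ (res : List (List Int)), (∀ row ∈ res, row.length = m) → (∀ k ∈ l, k < res.length) →
    ∀ i, (l.foldl (fun res k =>
            (List.range m).foldl (fun res j => res.set k ((res.getD k []).set j (val k j))) res)
          res)[i]?
        = if i ∈ l then some ((List.range m).map (val i)) else res[i]? := by
  induction l with
  | nil => simp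
  | cons k l ih =>
      intro res hrows hl i
      have hk : k < res.length := hl k (by simp)
      have hmem : res.getD k [] ∈ res := by
        rw [List.getD_eq_getElem?_getD, List.getElem?_eq_getElem hk]
        exact List.getElem_mem hk
      simp only [List.foldl_cons]
      rw [pv_stepA val m res k hk (hrows _ hmem)]
      rw [ih _ ?_ ?_ i]
      · by_cases hik : i = k
        · subst hik
          by_cases hil : i ∈ l <;>
            simp [hil, hk]
        · by_cases hil : i ∈ l <;>
            simp [hil, hik, Ne.symm hik]
      · intro row hrmem
        rcases List.mem_or_eq_of_mem_set hrmem with h | h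
        · exact hrows _ h
        · simp [h]
      · intro k' hk'
        simpa using hl k' (List.mem_cons_of_mem _ hk')

-- A's whole grid
theorem pv_gridA (val : Nat → Nat → Int) (n m : Nat) :
    (List.range n).foldl (fun res k =>
        (List.range m).foldl (fun res j => res.set k ((res.getD k []).set j (val k j))) res)
      ((List.range n).map (fun _ => (List.range m).map (fun _ => (0 : Int))))
      = (List.range n).map (fun k => (List.range m).map (val k)) := by
  apply List.ext_getElem?
  intro i
  rw [pv_foldA val m (List.range n) _ ?_ ?_ i]
  · by_cases hi : i < n
    · simp [hi]
    · simp [hi]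
  · intro row hrmem
    rcases List.mem_map.mp hrmem with ⟨k, _, rfl⟩
    simp
  · intro k hmem
    simpa using hmem

-- A's loop-index pixel equals the target cell value
theorem pv_valA_eq (imagem M : List (List Int)) (D : Int) (k j : Nat) :
    pvValA imagem M D (1 + (k : Int)) (1 + (j : Int)) = pvVal imagem M D k j := by
  have hsum : ∀ v : Int,
      (if (if v < 0 then 0 else v) > 255 then 255 else (if v < 0 then 0 else v))
        = min 255 (max 0 v) := by
    intro v; split_ifs <;> omega
  unfold pvValA pvVal
  rw [hsum]
  have : pvAcc9 imagem M k j =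
      pyCell M 0 0 * pyCell imagem (1 + (k:Int) - 1) (1 + (j:Int) - 1) + pyCell M 0 1 * pyCell imagem (1 + (k:Int) - 1) (1 + (j:Int)) + pyCell M 0 2 * pyCell imagem (1 + (k:Int) - 1) (1 + (j:Int) + 1) +
      (pyCell M 1 0 * pyCell imagem (1 + (k:Int)) (1 + (j:Int) - 1) + pyCell M 1 1 * pyCell imagem (1 + (k:Int)) (1 + (j:Int)) + pyCell M 1 2 * pyCell imagem (1 + (k:Int)) (1 + (j:Int) + 1)) +
      (pyCell M 2 0 * pyCell imagem (1 + (k:Int) + 1) (1 + (j:Int) - 1) + pyCell M 2 1 * pyCell imagem (1 + (k:Int) + 1) (1 + (j:Int)) + pyCell M 2 2 * pyCell imagem (1 + (k:Int) + 1) (1 + (j:Int) + 1)) := by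
    unfold pvAcc9
    have e1 : (1 + (k:Int) - 1) = (k:Int) + 0 := by ring
    have e2 : (1 + (j:Int) - 1) = (j:Int) + 0 := by ring
    have e3 : (1 + (k:Int)) = (k:Int) + 1 := by ring
    have e4 : (1 + (j:Int)) = (j:Int) + 1 := by ring
    have e5 : (1 + (k:Int) + 1) = (k:Int) + 2 := by ring
    have e6 : (1 + (j:Int) + 1) = (j:Int) + 2 := by ring
    rw [e1, e2, e5, e6, e3, e4]
    ring
  rw [this]

theorem convolucao_eq_target (imagem M : List (List Int)) (D : Int) :
    convolucao imagem M D = pvTarget imagem M D := by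
  have e1 : ∀ t : Nat, ((1 : Int) + (t : Int) - 1).toNat = t := by intro t; omega
  have hA : convolucao imagem M D
      = (List.range ((imagem.length : Int) - 2).toNat).foldl (fun res k =>
          (List.range (((PySem.List.pyGetD imagem 0 []).length : Int) - 2).toNat).foldl
            (fun res j => res.set k ((res.getD k []).set j
              (pvValA imagem M D (1 + (k : Int)) (1 + (j : Int))))) res)
          ((List.range ((imagem.length : Int) - 2).toNat).map (fun _ =>
            (List.range (((PySem.List.pyGetD imagem 0 []).length : Int) - 2).toNat).map
              (fun _ => (0 : Int)))) := by
    simp only [convolucao, pvValA]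
    rw [PySem.List.pyRange_one, PySem.List.pyRange_one]
    have c1 : ((imagem.length : Int) - 1 - 1).toNat = ((imagem.length : Int) - 2).toNat := by omega
    have c2 : (((PySem.List.pyGetD imagem 0 []).length : Int) - 1 - 1).toNat
        = (((PySem.List.pyGetD imagem 0 []).length : Int) - 2).toNat := by omega
    simp only [List.foldl_map, c1, c2, e1, List.map_const', List.length_range]
  rw [hA, pv_gridA]
  unfold pvTarget
  apply List.map_congr_left
  intro k _
  apply List.map_congr_left
  intro j _
  exact pv_valA_eq imagem M D k j


-- one accumulation pass on a grid given pointwise by g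
theorem pv_convStep_map_range (imagem M : List (List Int)) (ki kj : Int)
    (g : Nat → Nat → Int) (n m : Nat) :
    convStep imagem M ki kj
        ((List.range n).map (fun k => (List.range m).map (fun j => g k j)))
      = (List.range n).map (fun k => (List.range m).map (fun j =>
          g k j + pyCell M ki kj * pyCell imagem ((k : Int) + ki) ((j : Int) + kj))) := by
  apply List.ext_getElem
  · simp [convStep]
  · intro i h1 h2
    simp only [convStep, List.getElem_mapIdx, List.getElem_map, List.getElem_range] at h1 h2 ⊢
    apply List.ext_getElem
    · simp
    · intro j hj1 hj2
      simp

theorem convolucao_alt_eq_target (imagem M : List (List Int)) (D : Int) :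
    convolucao_alt imagem M D = pvTarget imagem M D := by
  unfold convolucao_alt
  have h3 : PySem.List.pyRange 0 3 1 = [0, 1, 2] := by decide
  have h0 : List.replicate (((PySem.List.pyGetD imagem 0 []).length : Int) - 2).toNat (0 : Int)
      = (List.range (((PySem.List.pyGetD imagem 0 []).length : Int) - 2).toNat).map
          (fun _ => (0 : Int)) := by
    simp [List.map_const']
  have hrep : List.replicate ((imagem.length : Int) - 2).toNat
        (List.replicate (((PySem.List.pyGetD imagem 0 []).length : Int) - 2).toNat (0 : Int))
      = (List.range ((imagem.length : Int) - 2).toNat).map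
          (fun _ => (List.range (((PySem.List.pyGetD imagem 0 []).length : Int) - 2).toNat).map
            (fun _ => (0 : Int))) := by
    rw [← h0]; simp [List.map_const']
  rw [h3]
  simp only [List.foldl_cons, List.foldl_nil, hrep, pv_convStep_map_range]
  unfold pvTarget
  simp only [List.map_map]
  apply List.map_congr_left
  intro k _
  simp only [Function.comp]
  rw [List.map_map]
  apply List.map_congr_left
  intro j _
  simp [pvVal, pvAcc9]

-- ===== VERDICT (by name: the statement is the Claim_ definition above) =====
theorem convolucao_spec : Claim_equal_convolucao := by
  intro imagem M D _ _
  unfold Spec_convolucao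
  rw [convolucao_eq_target, convolucao_alt_eq_target]
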